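-- pv_equiv track=rewrite | github.com/rodartecode/Open-Genome-Explorer | apps/OpenGenomeExplorer/controllers.py | calculate_weight_of_evidence
-- ===== SOURCE A (Python) =====
-- def calculate_weight_of_evidence(publications):
--     # publications is a dict with name of each publisher as key and
--     # a list of annotations that they've published as the value
--     #
--     # according to opensnp weight of evidence is calculated as follows:
--     # each snpedia entry is worth 5 points
--     # plos, pgp_annotations, and genome_gov_publications are worth 2 points
--     # all other annotations are worth 1 point
--     # the total weight of evidence is the sum of all points
--     weight_of_evidence = 0
--     for publisher, _ in publications:
--         if publisher == 'snpedia':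
--             weight_of_evidence += 5
--         elif publisher in ['plos', 'pgp_annotations', 'genome_gov_publications']:
--             weight_of_evidence += 2
--         else:
--             weight_of_evidence += 1
--     return weight_of_evidence
-- ===== SOURCE B (Python) =====
-- def calculate_weight_of_evidence(publications):
--     names = [publisher for publisher, _ in publications]
--     snp = names.count('snpedia')
--     two = (names.count('plos')
--            + names.count('pgp_annotations')
--            + names.count('genome_gov_publications'))
--     return 5 * snp + 2 * two + (len(names) - snp - two)
-- ===== Notes on version B (the rewrite author's own statement) =====
-- stated objective: alternative
-- what changed: Replaced the per-element branch-and-accumulate loop by per-category counting passes (list.count on the extracted publisher names) combined in a single closed-form arithmetic expression.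
import Mathlib
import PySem

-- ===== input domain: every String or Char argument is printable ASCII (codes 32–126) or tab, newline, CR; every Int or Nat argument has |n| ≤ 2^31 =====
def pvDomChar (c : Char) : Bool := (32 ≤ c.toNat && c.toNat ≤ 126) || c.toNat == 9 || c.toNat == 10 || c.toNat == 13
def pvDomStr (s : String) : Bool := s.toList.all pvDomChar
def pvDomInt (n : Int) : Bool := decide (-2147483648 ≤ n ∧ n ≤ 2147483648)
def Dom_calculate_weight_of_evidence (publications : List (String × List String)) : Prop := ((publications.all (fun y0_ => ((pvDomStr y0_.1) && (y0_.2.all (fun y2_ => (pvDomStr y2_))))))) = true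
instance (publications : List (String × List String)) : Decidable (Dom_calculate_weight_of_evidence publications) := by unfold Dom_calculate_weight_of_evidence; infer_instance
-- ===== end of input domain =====

-- B replaces A's branch-and-accumulate loop by per-category counting passes combined
-- in one closed-form arithmetic expression (objective: alternative decomposition).

-- ===== PORT A =====
def calculate_weight_of_evidence (publications : List (String × List String)) : Int :=
  publications.foldl (fun weight_of_evidence pub =>
    let publisher := pub.1
    if publisher == "snpedia" then weight_of_evidence + 5
    else if ["plos", "pgp_annotations", "genome_gov_publications"].contains publisher then
      weight_of_evidence + 2
    else weight_of_evidence + 1) 0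

-- ===== PORT B =====
def calculate_weight_of_evidence_alt (publications : List (String × List String)) : Int :=
  let names := publications.map (fun pub => pub.1)
  let snp : Int := PySem.List.count names "snpedia"
  let two : Int := (PySem.List.count names "plos" : Int)
    + (PySem.List.count names "pgp_annotations" : Int)
    + (PySem.List.count names "genome_gov_publications" : Int)
  5 * snp + 2 * two + ((names.length : Int) - snp - two)

-- ===== PRECONDITION & SPEC =====
def Spec_calculate_weight_of_evidence (publications : List (String × List String)) (out : Int) : Prop := out = calculate_weight_of_evidence_alt publications
instance (publications : List (String × List String)) (out : Int) : Decidable (Spec_calculate_weight_of_evidence publications out) := by unfold Spec_calculate_weight_of_evidence; infer_instance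

-- ===== CLAIM (what is proved, stated in full; the proofs are below) =====
def Claim_equal_calculate_weight_of_evidence : Prop := ∀ (publications : List (String × List String)), Dom_calculate_weight_of_evidence publications → Spec_calculate_weight_of_evidence publications (calculate_weight_of_evidence publications)

-- ===== LEMMAS AND PROOFS =====
theorem cwoe_foldl_eq (l : List (String × List String)) (acc : Int) :
    l.foldl (fun weight_of_evidence pub =>
      let publisher := pub.1
      if publisher == "snpedia" then weight_of_evidence + 5
      else if ["plos", "pgp_annotations", "genome_gov_publications"].contains publisher then
        weight_of_evidence + 2
      else weight_of_evidence + 1) acc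
    = acc + 5 * ((l.map (fun pub => pub.1)).count "snpedia" : Int)
        + 2 * (((l.map (fun pub => pub.1)).count "plos" : Int)
          + ((l.map (fun pub => pub.1)).count "pgp_annotations" : Int)
          + ((l.map (fun pub => pub.1)).count "genome_gov_publications" : Int))
        + (((l.map (fun pub => pub.1)).length : Int)
          - ((l.map (fun pub => pub.1)).count "snpedia" : Int)
          - (((l.map (fun pub => pub.1)).count "plos" : Int)
            + ((l.map (fun pub => pub.1)).count "pgp_annotations" : Int)
            + ((l.map (fun pub => pub.1)).count "genome_gov_publications" : Int))) := by
  induction l generalizing acc with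
  | nil => simp
  | cons h t ih =>
    simp only [List.foldl_cons, List.map_cons, List.count_cons, List.length_cons]
    rw [ih]
    by_cases h1 : h.1 = "snpedia"
    · simp [h1]; push_cast; ring
    · by_cases h2 : h.1 = "plos"
      · simp [h1, h2]; push_cast; ring
      · by_cases h3 : h.1 = "pgp_annotations"
        · simp [h1, h2, h3]; push_cast; ring
        · by_cases h4 : h.1 = "genome_gov_publications"
          · simp [h1, h2, h3, h4]; push_cast; ring
          · simp [h1, h2, h3, h4, beq_iff_eq]
            push_cast; ring

-- ===== VERDICT (by name: the statement is the Claim_ definition above) =====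
theorem calculate_weight_of_evidence_spec : Claim_equal_calculate_weight_of_evidence := by
  intro publications _
  unfold Spec_calculate_weight_of_evidence calculate_weight_of_evidence calculate_weight_of_evidence_alt
  rw [cwoe_foldl_eq]
  simp [PySem.List.count_eq]
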